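-- pv_equiv track=rewrite | github.com/Miner3D-Gamer/Ender-Py | ge/parsing.py | expect_next_action
-- ===== SOURCE A (Python) =====
-- from typing import NoReturn
--
-- def expect_next_action(
--     string: str, plus: str, inp_idx: int, end: str = ""
-- ) -> tuple[str, int] | NoReturn:
--     if string == "":
--         return "", inp_idx
--     idx = -1
--     for char in string:
--         idx += 1
--         if char == " ":
--             continue
--         else:
--             if plus and not char == "[":
--                 if char == plus:
--                     return expect_next_action(string[idx + 1 :], "", inp_idx + idx)
--                 if char == end:
--                     return string[idx + 1 :], inp_idx + idx
--                 raise Exception(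
--                     "Expected %s but got %s in %s (Did you close one too many brackets?) at character %s"
--                     % (plus, char, string, inp_idx + idx)
--                 )
--             else:
--                 return string[idx:], inp_idx + idx
--
--     raise Exception("Expected action got '%s' at character %s" % string, inp_idx + idx)
-- ===== SOURCE B (Python) =====
-- def expect_next_action(string, plus, inp_idx, end=""):
--     # Iterative: no self-recursion; the '+'-match case is resolved by a second
--     # in-function lstrip of the remainder instead of the recursive call.
--     if not string:
--         return "", inp_idx
--     stripped = string.lstrip(" ")
--     if not stripped:
--         raise Exception("expected an action in %r at character %s" % (string, inp_idx + len(string) - 1))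
--     idx = len(string) - len(stripped)
--     char = stripped[0]
--     if not plus or char == "[":
--         return stripped, inp_idx + idx
--     if char == plus:
--         rest = stripped[1:]
--         rstripped = rest.lstrip(" ")
--         if not rstripped:
--             return "", inp_idx + idx
--         return rstripped, inp_idx + idx + (len(rest) - len(rstripped))
--     if char == end:
--         return stripped[1:], inp_idx + idx
--     raise Exception(
--         "Expected %s but got %s in %s (Did you close one too many brackets?) at character %s"
--         % (plus, char, string, inp_idx + idx)
--     )
-- ===== Notes on version B (the rewrite author's own statement) =====
-- stated objective: idiomatic
-- what changed: Replaced A's index-counting for-loop plus self-recursive call by a fully iterative decomposition: lstrip-based computation of the first non-space index, a single dispatch on that char, and a second lstrip scan of the remainder instead of the recursive call.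
import Mathlib
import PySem

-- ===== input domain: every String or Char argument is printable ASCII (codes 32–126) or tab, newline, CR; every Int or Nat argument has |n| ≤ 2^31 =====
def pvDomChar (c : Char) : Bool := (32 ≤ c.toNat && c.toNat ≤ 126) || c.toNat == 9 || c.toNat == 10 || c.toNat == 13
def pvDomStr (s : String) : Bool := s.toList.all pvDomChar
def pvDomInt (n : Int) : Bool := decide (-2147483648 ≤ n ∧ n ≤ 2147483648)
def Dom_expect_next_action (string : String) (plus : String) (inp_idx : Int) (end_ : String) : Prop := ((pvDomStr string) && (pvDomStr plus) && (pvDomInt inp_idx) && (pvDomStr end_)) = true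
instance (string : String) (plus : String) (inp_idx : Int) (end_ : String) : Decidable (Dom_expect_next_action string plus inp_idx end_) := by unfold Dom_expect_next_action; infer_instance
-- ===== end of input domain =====

-- B replaces A's single shallow self-recursion by a fully iterative two-scan dispatch (objective: idiomatic/simpler); equal wherever A returns.


-- ===== PORT A =====
-- A's `for char in string` skipping spaces: first non-space char with its index (Python raises when none; `none` here).
def eaFindNonSpace : List Char → Nat → Option (Nat × Char)
  | [], _ => none
  | c :: rest, i => if c = ' ' then eaFindNonSpace rest (i + 1) else some (i, c)

-- Literal port of A's body over List Char; the raise branches (excluded by Pre_) return a placeholder.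
def eaA (s : List Char) (plus : String) (inp_idx : Int) (end_ : String) : String × Int :=
  if s = [] then ("", inp_idx)
  else
    match eaFindNonSpace s 0 with
    | none => ("", inp_idx)  -- Python: raise TypeError (all-space string); unreachable under Pre_
    | some (idx, c) =>
      if plus ≠ "" ∧ c ≠ '[' then
        if String.ofList [c] = plus then
          eaA (s.drop (idx + 1)) "" (inp_idx + idx) ""  -- recursive call; Python's `end` defaults to ""
        else if String.ofList [c] = end_ then (String.ofList (s.drop (idx + 1)), inp_idx + idx)
        else ("", inp_idx + idx)  -- Python: raise Exception (mismatch); unreachable under Pre_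
      else (String.ofList (s.drop idx), inp_idx + idx)
  termination_by s.length
  decreasing_by
    simp only [List.length_drop]
    have hlen : 0 < s.length := by cases s <;> simp_all
    omega

def expect_next_action (string : String) (plus : String) (inp_idx : Int) (end_ : String) : String × Int :=
  eaA string.toList plus inp_idx end_

-- ===== PORT B =====
-- Source B's `lstrip(" ")`: drop leading spaces (exact: only ' ' is stripped).
def altLstrip : List Char → List Char
  | [] => []
  | c :: rest => if c = ' ' then altLstrip rest else c :: rest

-- Literal port of Source B: iterative, no recursion; the two raise branches return placeholders (outside Pre_).
def expect_next_action_alt (string : String) (plus : String) (inp_idx : Int) (end_ : String) : String × Int :=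
  let s := string.toList
  if s = [] then ("", inp_idx)
  else
    match altLstrip s with
    | [] => ("", inp_idx)  -- Python B: raise Exception (no action); unreachable under Pre_
    | char :: rest =>
      let idx : Nat := s.length - (1 + rest.length)
      if plus = "" ∨ char = '[' then (String.ofList (char :: rest), inp_idx + idx)
      else if String.ofList [char] = plus then
        let rstripped := altLstrip rest
        if rstripped = [] then ("", inp_idx + idx)
        else (String.ofList rstripped, inp_idx + idx + (rest.length - rstripped.length))
      else if String.ofList [char] = end_ then (String.ofList rest, inp_idx + idx)
      else ("", inp_idx + idx)  -- Python B: raise Exception (mismatch); unreachable under Pre_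

-- ===== PRECONDITION & SPEC =====
-- Pre_ excludes exactly the inputs on which Python A raises: a non-empty all-space string
-- (TypeError from the broken final format), a first non-space char that matches neither
-- `plus` nor `end` while `plus` is set and the char is not '[', and a `plus`-match whose
-- remainder is non-empty but all spaces (the recursion then hits the TypeError raise).
-- Closed-form shape condition on the input string: it is checked on the list of chars
-- with its leading spaces removed (List.dropWhile), no algorithm is executed.
def preCheck (t : List Char) (plus : String) (end_ : String) : Bool :=
  match t with
  | [] => false
  | c :: rest =>
    if plus ≠ "" ∧ c ≠ '[' then
      if String.ofList [c] = plus then (decide (rest = []) || decide (rest.dropWhile (fun x => x == ' ') ≠ []))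
      else decide (String.ofList [c] = end_)
    else true

def Pre_expect_next_action (string : String) (plus : String) (inp_idx : Int) (end_ : String) : Prop :=
  string.toList = [] ∨ preCheck (string.toList.dropWhile (fun x => x == ' ')) plus end_ = true
instance (string : String) (plus : String) (inp_idx : Int) (end_ : String) : Decidable (Pre_expect_next_action string plus inp_idx end_) := by unfold Pre_expect_next_action; infer_instance

def pvWitness_expect_next_action : String × String × Int × String := (" +x y", "+", 5, "")

def Spec_expect_next_action (string : String) (plus : String) (inp_idx : Int) (end_ : String) (out : String × Int) : Prop := out = expect_next_action_alt string plus inp_idx end_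
instance (string : String) (plus : String) (inp_idx : Int) (end_ : String) (out : String × Int) : Decidable (Spec_expect_next_action string plus inp_idx end_ out) := by unfold Spec_expect_next_action; infer_instance

-- ===== CLAIM (what is proved, stated in full; the proofs are below) =====
def Claim_equal_expect_next_action : Prop := ∀ (string : String) (plus : String) (inp_idx : Int) (end_ : String), Dom_expect_next_action string plus inp_idx end_ → Pre_expect_next_action string plus inp_idx end_ → Spec_expect_next_action string plus inp_idx end_ (expect_next_action string plus inp_idx end_)
-- ===== LEMMAS AND PROOFS =====

theorem altLstrip_length_le (s : List Char) : (altLstrip s).length ≤ s.length := by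
  induction s with
  | nil => simp [altLstrip]
  | cons c rest ih =>
    simp only [altLstrip]
    split_ifs <;> simp <;> omega

theorem eaFindNonSpace_eq (s : List Char) (i : Nat) :
    eaFindNonSpace s i =
      (altLstrip s).head?.map (fun c => (i + (s.length - (altLstrip s).length), c)) := by
  induction s generalizing i with
  | nil => simp [eaFindNonSpace, altLstrip]
  | cons c rest ih =>
    simp only [eaFindNonSpace, altLstrip]
    split_ifs with h
    · rw [ih]
      have hle := altLstrip_length_le rest
      cases hs : altLstrip rest with
      | nil => simp
      | cons a t => rw [hs] at hle; simp at hle ⊢; omega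
    · simp

theorem drop_altLstrip (s : List Char) :
    s.drop (s.length - (altLstrip s).length) = altLstrip s := by
  induction s with
  | nil => simp [altLstrip]
  | cons c rest ih =>
    simp only [altLstrip]
    split_ifs with h
    · have := altLstrip_length_le rest
      have hlen : (c :: rest).length - (altLstrip rest).length
          = (rest.length - (altLstrip rest).length) + 1 := by simp; omega
      rw [hlen]
      simpa using ih
    · simp

theorem drop_altLstrip_succ (s : List Char) (c : Char) (rest : List Char)
    (h : altLstrip s = c :: rest) :
    s.drop (s.length - (altLstrip s).length + 1) = rest := by
  have h1 := drop_altLstrip s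
  have : s.drop (s.length - (altLstrip s).length + 1)
      = (s.drop (s.length - (altLstrip s).length)).drop 1 := by
    rw [List.drop_drop, Nat.add_comm]
  rw [this, h1, h]
  simp

-- main equality on the list level, under the (unfolded) precondition
theorem eaA_eq_alt (s : List Char) (plus : String) (inp_idx : Int) (end_ : String)
    (hpre : s = [] ∨
      match altLstrip s with
      | [] => False
      | c :: rest =>
        if plus ≠ "" ∧ c ≠ '[' then
          if String.ofList [c] = plus then rest = [] ∨ altLstrip rest ≠ []
          else String.ofList [c] = end_
        else True) :
    eaA s plus inp_idx end_ =
      (if s = [] then ("", inp_idx)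
       else
         match altLstrip s with
         | [] => ("", inp_idx)
         | char :: rest =>
           let idx : Nat := s.length - (1 + rest.length)
           if plus = "" ∨ char = '[' then (String.ofList (char :: rest), inp_idx + idx)
           else if String.ofList [char] = plus then
             let rstripped := altLstrip rest
             if rstripped = [] then ("", inp_idx + idx)
             else (String.ofList rstripped, inp_idx + idx + (rest.length - rstripped.length))
           else if String.ofList [char] = end_ then (String.ofList rest, inp_idx + idx)
           else ("", inp_idx + idx)) := by
  by_cases hnil : s = []
  · subst hnil; simp [eaA]
  · rw [eaA]
    simp only [if_neg hnil]
    rcases hstrip : altLstrip s with _ | ⟨c, rest⟩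
    · exfalso
      rcases hpre with h | h
      · exact hnil h
      · rw [hstrip] at h
        exact h
    · have hfind := eaFindNonSpace_eq s 0
      rw [hstrip] at hfind
      simp only [List.head?, Option.map_some, Nat.zero_add, List.length_cons] at hfind
      rw [hfind]
      have hidx : s.length - (1 + rest.length) = s.length - (rest.length + 1) := by omega
      have hdrop : s.drop (s.length - (rest.length + 1)) = c :: rest := by
        have h1 := drop_altLstrip s
        rw [hstrip] at h1
        simpa using h1
      have hdrop1 : s.drop (s.length - (rest.length + 1) + 1) = rest := by
        have h1 := drop_altLstrip_succ s c rest hstrip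
        rw [hstrip] at h1
        simpa using h1
      simp only [hidx]
      by_cases hplus : plus ≠ "" ∧ c ≠ '['
      · have hnotor : ¬ (plus = "" ∨ c = '[') := by
          rcases hplus with ⟨h1, h2⟩; rintro (h | h) <;> contradiction
        rw [if_pos hplus, if_neg hnotor]
        by_cases hmatch : String.ofList [c] = plus
        · rw [if_pos hmatch, if_pos hmatch, hdrop1, eaA]
          by_cases hrest : rest = []
          · subst hrest
            simp [altLstrip]
          · rw [if_neg hrest]
            have hfind2 := eaFindNonSpace_eq rest 0
            rcases hr : altLstrip rest with _ | ⟨c', r'⟩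
            · -- rest non-empty but all spaces: excluded by Pre_
              exfalso
              rcases hpre with h | h
              · exact hnil h
              · rw [hstrip] at h
                simp only [if_pos hplus, if_pos hmatch] at h
                rcases h with h | h
                · exact hrest h
                · exact h hr
            · rw [hr] at hfind2
              simp only [List.head?, Option.map_some, Nat.zero_add, List.length_cons] at hfind2
              rw [hfind2]
              simp only [hr]
              rw [if_neg (List.cons_ne_nil c' r')]
              have hne : ¬ (("" : String) ≠ "" ∧ c' ≠ '[') := by simp
              rw [if_neg hne]
              have hd : rest.drop (rest.length - (r'.length + 1)) = c' :: r' := by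
                have h1 := drop_altLstrip rest
                rw [hr] at h1
                simpa using h1
              rw [hd]
              have hle := altLstrip_length_le rest
              rw [hr] at hle
              simp only [List.length_cons] at hle
              have hle2 := altLstrip_length_le s
              rw [hstrip] at hle2
              simp only [List.length_cons] at hle2
              refine Prod.ext rfl ?_
              simp only [List.length_cons]
              push_cast
              omega
        · rw [if_neg hmatch, if_neg hmatch]
          by_cases hend : String.ofList [c] = end_
          · rw [if_pos hend, if_pos hend, hdrop1]
          · -- mismatch: excluded by Pre_
            exfalso
            rcases hpre with h | h
            · exact hnil h
            · rw [hstrip] at h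
              simp only [if_pos hplus, if_neg hmatch] at h
              exact hend h
      · rw [if_neg hplus]
        have hor : plus = "" ∨ c = '[' := by
          by_contra hc
          push_neg at hc
          exact hplus ⟨hc.1, hc.2⟩
        rw [if_pos hor, hdrop]

-- ===== VERDICT (by name: the statement is the Claim_ definition above) =====
theorem altLstrip_eq (s : List Char) : altLstrip s = s.dropWhile (fun x => x == ' ') := by
  induction s with
  | nil => simp [altLstrip]
  | cons c rest ih =>
    by_cases h : c = ' '
    · simp [altLstrip, List.dropWhile_cons, h, ih]
    · simp [altLstrip, List.dropWhile_cons, h]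

theorem preCheck_unfold_cons (plus end_ : String) (c : Char) (rest : List Char)
    (h : preCheck (c :: rest) plus end_ = true) :
    (if plus ≠ "" ∧ c ≠ '[' then
      (if String.ofList [c] = plus then rest = [] ∨ altLstrip rest ≠ []
       else String.ofList [c] = end_)
     else True) := by
  simp only [preCheck] at h
  rw [← altLstrip_eq rest] at h
  split_ifs at h ⊢ <;> simp_all

theorem expect_next_action_spec : Claim_equal_expect_next_action := by
  intro string plus inp_idx end_ _ hpre
  unfold Spec_expect_next_action expect_next_action expect_next_action_alt
  refine eaA_eq_alt string.toList plus inp_idx end_ ?_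
  rcases hpre with h | h
  · exact Or.inl h
  · right
    rw [← altLstrip_eq string.toList] at h
    rcases hs : altLstrip string.toList with _ | ⟨c, rest⟩ <;> rw [hs] at h
    · simp [preCheck] at h
    · exact preCheck_unfold_cons plus end_ c rest h
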